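-- pv_equiv track=rewrite | github.com/fagonzalezo/kdm_for_probabilistic_DL_experiments | src/kqm/generate_grid_config_from_base_and_array_parameter.py | generate_grid_config_from_base_and_array_parameter
-- ===== SOURCE A (Python) =====
-- import itertools
--
-- def generate_grid_config_from_base_and_array_parameter(original_dict, product_dict):
--     if not original_dict or not product_dict:
--         return {}
--     keys = product_dict.keys()
--     values = product_dict.values()
--     array_product = [{name: dato for name,dato in zip(keys, datos)} \
--                      for datos in itertools.product(*values)]
--     settings = [dict(original_dict, **current_dict) for current_dict in array_product]
--     return settings
-- ===== SOURCE B (Python) =====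
-- def generate_grid_config_from_base_and_array_parameter(original_dict, product_dict):
--     if not original_dict or not product_dict:
--         return {}
--     results = [dict(original_dict)]
--     for key, vals in product_dict.items():
--         results = [{**partial, key: v} for partial in results for v in vals]
--     return results
-- ===== Notes on version B (the rewrite author's own statement) =====
-- stated objective: simpler
-- what changed: B drops itertools.product and the zip-based tuple-to-dict step: it grows the list of partial config dicts incrementally, one product key at a time, merging each value in with {**partial, key: v}.
-- outside the precondition, e.g. on generate_grid_config_from_base_and_array_parameter({}, {}): A returns {}, B returns {}; on generate_grid_config_from_base_and_array_parameter({'a': '1'}, {}): A returns {}, B returns {}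
import Mathlib
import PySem

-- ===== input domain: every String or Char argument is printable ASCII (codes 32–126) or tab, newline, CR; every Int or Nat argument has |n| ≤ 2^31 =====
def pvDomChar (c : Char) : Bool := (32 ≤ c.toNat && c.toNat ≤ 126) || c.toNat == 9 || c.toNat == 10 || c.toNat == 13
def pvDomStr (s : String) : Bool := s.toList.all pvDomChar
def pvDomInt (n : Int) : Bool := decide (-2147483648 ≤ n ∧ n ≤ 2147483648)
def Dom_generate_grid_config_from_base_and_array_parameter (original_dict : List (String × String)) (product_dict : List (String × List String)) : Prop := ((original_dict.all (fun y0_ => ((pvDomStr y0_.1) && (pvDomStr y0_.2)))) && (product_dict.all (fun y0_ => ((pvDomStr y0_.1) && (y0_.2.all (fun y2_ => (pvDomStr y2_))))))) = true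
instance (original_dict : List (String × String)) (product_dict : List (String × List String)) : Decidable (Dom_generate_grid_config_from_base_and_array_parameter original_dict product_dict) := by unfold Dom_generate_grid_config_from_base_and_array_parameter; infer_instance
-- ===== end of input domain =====

-- B drops itertools.product and builds the config list incrementally, one product key at a
-- time (objective: simpler — a shorter, plainer decomposition; same asymptotic cost).


-- ===== PORT A =====
-- itertools.product(*values): rightmost factor varies fastest
def pvProduct : List (List String) → List (List String)
| [] => [[]]
| vs :: rest => vs.flatMap (fun a => (pvProduct rest).map (fun tl => a :: tl))

def generate_grid_config_from_base_and_array_parameter (original_dict : List (String × String)) (product_dict : List (String × List String)) : List (List (String × String)) :=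
  if original_dict = [] ∨ product_dict = [] then []
  else
    let keys := product_dict.map (·.1)
    let values := product_dict.map (·.2)
    -- {name: dato for name, dato in zip(keys, datos)}
    let array_product := (pvProduct values).map (fun datos =>
      (keys.zip datos).foldl (fun d p => d.insert p.1 p.2) (PySem.Dict.empty : PySem.Dict String String))
    -- dict(original_dict, **current_dict)
    let settings := array_product.map (fun current =>
      (current.items.foldl (fun d p => d.insert p.1 p.2) (PySem.Dict.mk original_dict)).items)
    settings

-- ===== PORT B =====
def generate_grid_config_from_base_and_array_parameter_alt (original_dict : List (String × String)) (product_dict : List (String × List String)) : List (List (String × String)) :=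
  if original_dict = [] ∨ product_dict = [] then []
  else
    let results := product_dict.foldl
      (fun results kv => results.flatMap (fun part => kv.2.map (fun v => part.insert kv.1 v)))
      [PySem.Dict.mk original_dict]
    results.map PySem.Dict.items

-- ===== PRECONDITION & SPEC =====
-- Pre_ excludes empty original_dict/product_dict, where A returns {} — an empty dict, not a
-- value of the declared list-of-dicts type (B returns the same {} there) — and product-dict
-- association lists with duplicate keys, which do not arise from any Python dict.
def Pre_generate_grid_config_from_base_and_array_parameter (original_dict : List (String × String)) (product_dict : List (String × List String)) : Prop :=
  original_dict ≠ [] ∧ product_dict ≠ [] ∧ (product_dict.map (·.1)).Nodup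
instance (original_dict : List (String × String)) (product_dict : List (String × List String)) : Decidable (Pre_generate_grid_config_from_base_and_array_parameter original_dict product_dict) := by unfold Pre_generate_grid_config_from_base_and_array_parameter; infer_instance

def pvWitness_generate_grid_config_from_base_and_array_parameter : (List (String × String)) × (List (String × List String)) :=
  ([("a", "1")], [("k", ["x", "y"]), ("m", ["u"])])

def Spec_generate_grid_config_from_base_and_array_parameter (original_dict : List (String × String)) (product_dict : List (String × List String)) (out : List (List (String × String))) : Prop := out = generate_grid_config_from_base_and_array_parameter_alt original_dict product_dict
instance (original_dict : List (String × String)) (product_dict : List (String × List String)) (out : List (List (String × String))) : Decidable (Spec_generate_grid_config_from_base_and_array_parameter original_dict product_dict out) := by unfold Spec_generate_grid_config_from_base_and_array_parameter; infer_instance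

-- ===== CLAIM (what is proved, stated in full; the proofs are below) =====
def Claim_equal_generate_grid_config_from_base_and_array_parameter : Prop := ∀ (original_dict : List (String × String)) (product_dict : List (String × List String)), Dom_generate_grid_config_from_base_and_array_parameter original_dict product_dict → Pre_generate_grid_config_from_base_and_array_parameter original_dict product_dict → Spec_generate_grid_config_from_base_and_array_parameter original_dict product_dict (generate_grid_config_from_base_and_array_parameter original_dict product_dict)

-- ===== LEMMAS AND PROOFS =====

-- B's incremental fold, started from any list of part dicts, enumerates the cartesian
-- product of the value lists and folds the zipped key/value pairs into each part dict.
lemma foldl_expand_eq_product (pd : List (String × List String)) :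
    ∀ (L : List (PySem.Dict String String)),
      pd.foldl (fun results kv => results.flatMap (fun part => kv.2.map (fun v => part.insert kv.1 v))) L
      = L.flatMap (fun d => (pvProduct (pd.map (·.2))).map (fun datos =>
          ((pd.map (·.1)).zip datos).foldl (fun d p => d.insert p.1 p.2) d)) := by
  induction pd with
  | nil => intro L; simp [pvProduct]
  | cons kv tl ih =>
    intro L
    simp only [List.foldl_cons, ih, pvProduct, List.map_cons]
    simp [List.flatMap_assoc, List.flatMap_map, List.map_flatMap, Function.comp_def, List.zip_cons_cons]

lemma map_fst_zip_sublist {α β : Type} : ∀ (a : List α) (b : List β), ((a.zip b).map Prod.fst).Sublist a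
  | _, [] => by simp
  | [], _ :: _ => by simp
  | x :: a, y :: b => by simpa using (map_fst_zip_sublist a b).cons₂ x

-- A dict comprehension over fresh distinct keys has exactly those items.
lemma items_zip_fresh (keys : List String) (datos : List String) (h : keys.Nodup) :
    ((keys.zip datos).foldl (fun d p => d.insert p.1 p.2) (PySem.Dict.empty : PySem.Dict String String)).items
      = keys.zip datos := by
  have hfresh : ∀ a ∈ keys.zip datos, (PySem.Dict.empty : PySem.Dict String String).contains a.1 = false := by
    intro a _; simp [PySem.Dict.contains_empty]
  have hnd : ((keys.zip datos).map (·.1)).Nodup := h.sublist (map_fst_zip_sublist keys datos)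
  have := PySem.Dict.items_foldl_insert_fresh (keys.zip datos) (·.1) (·.2)
      (PySem.Dict.empty : PySem.Dict String String) hfresh hnd
  simpa using this

-- ===== VERDICT (by name: the statement is the Claim_ definition above) =====
theorem generate_grid_config_from_base_and_array_parameter_spec : Claim_equal_generate_grid_config_from_base_and_array_parameter := by
  intro original_dict product_dict _ hpre
  obtain ⟨ho, hp, hnd⟩ := hpre
  unfold Spec_generate_grid_config_from_base_and_array_parameter
  unfold generate_grid_config_from_base_and_array_parameter
    generate_grid_config_from_base_and_array_parameter_alt
  rw [if_neg (by tauto), if_neg (by tauto)]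
  simp only [foldl_expand_eq_product, List.flatMap_cons, List.flatMap_nil, List.append_nil]
  simp only [List.map_map]
  apply List.map_congr_left
  intro datos _
  simp only [Function.comp_def]
  rw [items_zip_fresh _ _ hnd]
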